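-- pv_equiv track=rewrite | github.com/SAS-GreenLeaf/Domoleaf | domoslave/usr/lib/domoleaf/CalcLogs.py | cut_tab
-- ===== SOURCE A (Python) =====
-- def cut_tab(tab):
--     cut_tab = {};
--     cut_dict = {};
--
--     for log in tab:
--         device_id = log[2];
--         option_id = log[3];
--         if (device_id not in cut_tab):
--             cut_tab[device_id] = {};
--         if (option_id not in cut_tab[device_id]):
--             cut_tab[device_id][option_id] = [];
--         cut_tab[device_id][option_id].append(log);
--
--     for device in cut_tab:
--         cut_dict[device] = {};
--         for option in cut_tab[device]:
--             cut_dict[device][option] = [];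
--             for log in cut_tab[device][option]:
--                 cut_dict[device][option].append(log);
--
--     return cut_dict;
-- ===== SOURCE B (Python) =====
-- def _by_option(logs):
--     if not logs:
--         return {}
--     o = logs[0][3]
--     out = {o: [log for log in logs if log[3] == o]}
--     out.update(_by_option([log for log in logs if log[3] != o]))
--     return out
--
-- def cut_tab(tab):
--     if not tab:
--         return {}
--     d = tab[0][2]
--     out = {d: _by_option([log for log in tab if log[2] == d])}
--     out.update(cut_tab([log for log in tab if log[2] != d]))
--     return out
-- ===== Notes on version B (the rewrite author's own statement) =====
-- stated objective: alternative
-- what changed: B replaces A's dict-accumulating pass plus deep-copy pass by a filter/partition recursion: it peels off the first device_id, filters its logs (grouping their option_ids by the same recursive partitioning), and recurses on the remaining logs, so no membership checks, no mutation-by-append and no copy loop remain.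
import Mathlib
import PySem

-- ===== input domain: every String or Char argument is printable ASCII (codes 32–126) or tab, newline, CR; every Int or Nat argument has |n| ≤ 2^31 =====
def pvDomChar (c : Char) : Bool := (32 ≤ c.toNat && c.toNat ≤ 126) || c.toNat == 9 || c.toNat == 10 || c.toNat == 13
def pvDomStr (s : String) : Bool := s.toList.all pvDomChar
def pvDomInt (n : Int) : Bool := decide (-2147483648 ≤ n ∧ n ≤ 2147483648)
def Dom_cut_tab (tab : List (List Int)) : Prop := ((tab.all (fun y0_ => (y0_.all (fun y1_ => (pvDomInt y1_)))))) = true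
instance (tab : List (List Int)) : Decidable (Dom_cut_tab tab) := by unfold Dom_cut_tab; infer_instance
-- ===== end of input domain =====

-- B replaces A's dict-accumulating pass plus deep-copy pass by a filter/partition recursion on the list (objective: alternative, not faster).


-- device_id = log[2], option_id = log[3] (shared by both ports)
def pvDev (log : List Int) : Int := (PySem.List.pyGet? log 2).getD 0
def pvOpt (log : List Int) : Int := (PySem.List.pyGet? log 3).getD 0

-- ===== PORT A =====
-- first loop: group logs into a dict of dicts with explicit membership checks
def cutTabLoop1 (tab : List (List Int)) : PySem.Dict Int (PySem.Dict Int (List (List Int))) :=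
  tab.foldl (fun ct log =>
    let d := pvDev log
    let o := pvOpt log
    let ct := if ct.contains d then ct else ct.insert d PySem.Dict.empty
    let inner := ct.getD d PySem.Dict.empty
    let inner := if inner.contains o then inner else inner.insert o []
    let lst := inner.getD o []
    ct.insert d (inner.insert o (lst ++ [log]))) PySem.Dict.empty

def cut_tab (tab : List (List Int)) : List (Int × List (Int × List (List Int))) :=
  let ct := cutTabLoop1 tab
  -- second loop: element-by-element deep copy into cut_dict
  let cd := ct.items.foldl (fun cd p =>
      cd.insert p.1 (p.2.items.foldl (fun inn q =>
        inn.insert q.1 (q.2.foldl (fun acc log => acc ++ [log]) []))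
        PySem.Dict.empty))
    PySem.Dict.empty
  cd.items.map (fun p => (p.1, p.2.items))

-- ===== PORT B =====
-- _by_option: peel off the first option_id, keep its logs, recurse on the rest
def byOptionB (logs : List (List Int)) : PySem.Dict Int (List (List Int)) :=
  match logs with
  | [] => PySem.Dict.empty
  | log :: t =>
    let o := pvOpt log
    let mine := (log :: t).filter (fun l => pvOpt l == o)
    let rest := (log :: t).filter (fun l => !(pvOpt l == o))
    (PySem.Dict.empty.insert o mine).update (byOptionB rest).items
termination_by logs.length
decreasing_by
  simp only [List.filter_cons, beq_self_eq_true, Bool.not_true, Bool.false_eq_true,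
    if_false, List.length_cons]
  exact Nat.lt_succ_of_le (List.length_filter_le _ _)

-- cut_tab: peel off the first device_id, group its logs by option, recurse on the rest
def cutTabAltD (tab : List (List Int)) : PySem.Dict Int (PySem.Dict Int (List (List Int))) :=
  match tab with
  | [] => PySem.Dict.empty
  | log :: t =>
    let d := pvDev log
    let mine := (log :: t).filter (fun l => pvDev l == d)
    let rest := (log :: t).filter (fun l => !(pvDev l == d))
    (PySem.Dict.empty.insert d (byOptionB mine)).update (cutTabAltD rest).items
termination_by tab.length
decreasing_by
  simp only [List.filter_cons, beq_self_eq_true, Bool.not_true, Bool.false_eq_true,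
    if_false, List.length_cons]
  exact Nat.lt_succ_of_le (List.length_filter_le _ _)

def cut_tab_alt (tab : List (List Int)) : List (Int × List (Int × List (List Int))) :=
  (cutTabAltD tab).items.map (fun p => (p.1, p.2.items))

-- ===== PRECONDITION & SPEC =====
-- Both A and B raise IndexError on any log with fewer than 4 entries; exactly those inputs are excluded.
def Pre_cut_tab (tab : List (List Int)) : Prop := ∀ log ∈ tab, 4 ≤ log.length
instance (tab : List (List Int)) : Decidable (Pre_cut_tab tab) := by unfold Pre_cut_tab; infer_instance
def pvWitness_cut_tab : List (List Int) := [[0, 0, 1, 2], [9, 9, 1, 2, 5], [0, 0, 2, 2], [0, 0, 1, 3]]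

def Spec_cut_tab (tab : List (List Int)) (out : List (Int × List (Int × List (List Int)))) : Prop := out = cut_tab_alt tab
instance (tab : List (List Int)) (out : List (Int × List (Int × List (List Int)))) : Decidable (Spec_cut_tab tab out) := by unfold Spec_cut_tab; infer_instance

-- ===== CLAIM (what is proved, stated in full; the proofs are below) =====
def Claim_equal_cut_tab : Prop := ∀ (tab : List (List Int)), Dom_cut_tab tab → Pre_cut_tab tab → Spec_cut_tab tab (cut_tab tab)

-- ===== LEMMAS AND PROOFS =====

-- the single-insert (modify) form of A's first-loop step, and of the inner grouping step
def innerStep (inn : PySem.Dict Int (List (List Int))) (log : List Int) : PySem.Dict Int (List (List Int)) :=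
  inn.modify (pvOpt log) [] (· ++ [log])

def outerStep (ct : PySem.Dict Int (PySem.Dict Int (List (List Int)))) (log : List Int) : PySem.Dict Int (PySem.Dict Int (List (List Int))) :=
  ct.modify (pvDev log) PySem.Dict.empty (fun inn => innerStep inn log)

-- A's membership-check branches collapse to a modify at the key
theorem loop1_eq_fold (tab : List (List Int)) : cutTabLoop1 tab = tab.foldl outerStep PySem.Dict.empty := by
  unfold cutTabLoop1 outerStep innerStep
  congr 1
  funext ct log
  simp only [PySem.Dict.modify]
  by_cases h1 : ct.contains (pvDev log)
  · simp only [h1, if_true]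
    by_cases h2 : (ct.getD (pvDev log) PySem.Dict.empty).contains (pvOpt log)
    · simp only [h2, if_true]
    · simp only [h2, Bool.false_eq_true, if_false]
      rw [PySem.Dict.insert_insert_self, PySem.Dict.getD_insert_self,
        PySem.Dict.getD_of_not_contains _ [] (by simpa using h2)]
  · simp only [h1, Bool.false_eq_true, if_false]
    rw [PySem.Dict.getD_insert_self, PySem.Dict.getD_of_not_contains _ PySem.Dict.empty (by simpa using h1)]
    simp only [PySem.Dict.contains_empty, Bool.false_eq_true, if_false]
    rw [PySem.Dict.insert_insert_self, PySem.Dict.getD_insert_self, PySem.Dict.getD_empty,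
      PySem.Dict.insert_insert_self]

-- lookup in the outer fold = inner fold over the filtered logs
theorem foldl_outer_getD (tab : List (List Int)) (ct : PySem.Dict Int (PySem.Dict Int (List (List Int)))) (d : Int) :
    (tab.foldl outerStep ct).getD d PySem.Dict.empty
      = (tab.filter (fun l => pvDev l == d)).foldl innerStep (ct.getD d PySem.Dict.empty) := by
  induction tab generalizing ct with
  | nil => rfl
  | cons x t ih =>
    simp only [List.foldl_cons, List.filter_cons]
    by_cases h : pvDev x = d
    · subst h
      simp only [beq_self_eq_true, if_true, List.foldl_cons]
      rw [ih]
      unfold outerStep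
      rw [PySem.Dict.getD_modify_self]
    · have hb : (pvDev x == d) = false := by simp [h]
      simp only [hb, Bool.false_eq_true, if_false]
      rw [ih]
      unfold outerStep
      rw [PySem.Dict.getD_modify_of_ne _ _ _ (Ne.symm h)]

-- lookup in the inner fold = filter of the logs
theorem foldl_inner_getD (logs : List (List Int)) (inn : PySem.Dict Int (List (List Int))) (o : Int) :
    (logs.foldl innerStep inn).getD o [] = inn.getD o [] ++ logs.filter (fun l => pvOpt l == o) := by
  have h : logs.foldl innerStep inn
      = (logs.map (fun log => (pvOpt log, log))).foldl (fun d p => d.modify p.1 [] (· ++ [p.2])) inn := by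
    rw [List.foldl_map]
    rfl
  rw [h, PySem.Dict.getD_foldl_modify_append, List.filter_map, List.map_map]
  simp [Function.comp_def]

-- adding elements already distinct from a to a set containing a ignores the a-filter
theorem set_update_filter_ne (a : Int) (l : List Int) (s : List Int) (h : a ∈ s) :
    PySem.Set.update s l = PySem.Set.update s (l.filter (fun x => !(x == a))) := by
  induction l generalizing s with
  | nil => rfl
  | cons x t ih =>
    simp only [List.filter_cons]
    by_cases hx : x = a
    · subst hx
      have hadd : PySem.Set.add s x = s := by
        simp [PySem.Set.add, h]
      simp only [beq_self_eq_true, Bool.not_true, Bool.false_eq_true, if_false,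
        PySem.Set.update, List.foldl_cons, hadd]
      exact ih s h
    · have hb : (!(x == a)) = true := by simp [hx]
      simp only [hb, if_true, PySem.Set.update, List.foldl_cons]
      exact ih (PySem.Set.add s x) ((PySem.Set.mem_add s x a).mpr (Or.inl h))

-- updating past a head element none of the additions equals keeps the head in place
theorem set_update_cons_notmem (a : Int) (l : List Int) (h : ∀ x ∈ l, (x == a) = false) (s : List Int) :
    PySem.Set.update (a :: s) l = a :: PySem.Set.update s l := by
  induction l generalizing s with
  | nil => rfl
  | cons x t ih =>
    have hadd : PySem.Set.add (a :: s) x = a :: PySem.Set.add s x := by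
      have hxa : x ≠ a := by simpa using h x List.mem_cons_self
      by_cases hs : x ∈ s
      · simp [PySem.Set.add, hxa, hs]
      · simp [PySem.Set.add, hxa, hs]
    simp only [PySem.Set.update, List.foldl_cons, hadd]
    exact ih (fun y hy => h y (List.mem_cons_of_mem x hy)) (PySem.Set.add s x)

-- first-occurrence dedup of a cons
theorem set_ofList_cons (a : Int) (l : List Int) :
    PySem.Set.ofList (a :: l) = a :: PySem.Set.ofList (l.filter (fun x => !(x == a))) := by
  have h1 : PySem.Set.ofList (a :: l) = PySem.Set.update [a] l := rfl
  rw [h1, set_update_filter_ne a l [a] (List.mem_singleton.mpr rfl),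
    set_update_cons_notmem a _ (fun x hx => by simpa using (List.mem_filter.mp hx).2) []]
  rfl

-- items of the inner fold, in spec form
theorem inner_fold_items (logs : List (List Int)) :
    (logs.foldl innerStep PySem.Dict.empty).items
      = (PySem.Set.ofList (logs.map pvOpt)).map (fun o => (o, logs.filter (fun l => pvOpt l == o))) := by
  have hnd : (logs.foldl innerStep PySem.Dict.empty).keys.Nodup :=
    PySem.Dict.nodup_keys_foldl_modify_key logs pvOpt [] (fun _ x v => v ++ [x])
      PySem.Dict.empty (by simp)
  have hkeys : (logs.foldl innerStep PySem.Dict.empty).keys = PySem.Set.ofList (logs.map pvOpt) :=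
    PySem.Dict.keys_foldl_modify_key logs pvOpt [] (fun _ x v => v ++ [x]) PySem.Dict.empty
  rw [PySem.Dict.items_eq_map_keys _ hnd [], hkeys]
  refine List.map_congr_left fun o _ => ?_
  rw [foldl_inner_getD]
  simp

-- B's _by_option produces exactly those items
theorem byOptionB_items (logs : List (List Int)) :
    (byOptionB logs).items
      = (PySem.Set.ofList (logs.map pvOpt)).map (fun o => (o, logs.filter (fun l => pvOpt l == o))) := by
  fun_induction byOptionB logs with
  | case1 => rfl
  | case2 log t o mine rest ih =>
    have hrest : rest = t.filter (fun l => !(pvOpt l == pvOpt log)) := by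
      show (log :: t).filter (fun l => !(pvOpt l == pvOpt log)) = _
      simp
    rw [hrest] at ih
    -- items of the update: all recursive keys are fresh for the single-key base dict
    have hfresh : ∀ p ∈ (byOptionB (t.filter (fun l => !(pvOpt l == pvOpt log)))).items,
        (PySem.Dict.empty.insert o mine).contains p.1 = false := by
      intro p hp
      rw [ih] at hp
      obtain ⟨oo, hoo, rfl⟩ := List.mem_map.mp hp
      obtain ⟨x, hx, rfl⟩ := List.mem_map.mp ((PySem.Set.mem_ofList _ _).mp hoo)
      have hne : pvOpt x ≠ pvOpt log := by simpa using (List.mem_filter.mp hx).2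
      simp only [PySem.Dict.contains_insert, PySem.Dict.contains_empty, Bool.or_false,
        beq_eq_false_iff_ne, ne_eq]
      exact hne
    have hnodup : ((byOptionB (t.filter (fun l => !(pvOpt l == pvOpt log)))).items.map (·.1)).Nodup := by
      rw [ih, List.map_map]
      simp [Function.comp_def, PySem.Set.nodup_ofList]
    rw [hrest]
    show ((PySem.Dict.empty.insert o mine).update
        (byOptionB (t.filter (fun l => !(pvOpt l == pvOpt log)))).items).items = _
    have hfold : (List.foldl (fun acc p => acc.insert p.1 p.2) (PySem.Dict.empty.insert o mine)
          (byOptionB (t.filter (fun l => !(pvOpt l == pvOpt log)))).items).items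
        = (PySem.Dict.empty.insert o mine).items
            ++ (byOptionB (t.filter (fun l => !(pvOpt l == pvOpt log)))).items.map (fun p => (p.1, p.2)) :=
      PySem.Dict.items_foldl_insert_fresh
        ((byOptionB (t.filter (fun l => !(pvOpt l == pvOpt log)))).items)
        (fun (p : Int × List (List Int)) => p.1) (fun p => p.2)
        (PySem.Dict.empty.insert o mine) hfresh hnodup
    rw [show ((PySem.Dict.empty.insert o mine).update
          (byOptionB (t.filter (fun l => !(pvOpt l == pvOpt log)))).items).items
        = _ from hfold, ih]
    simp only [List.map_map, List.map_cons]
    rw [set_ofList_cons, List.map_cons]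
    have hsets : (t.filter (fun l => !(pvOpt l == pvOpt log))).map pvOpt
        = (t.map pvOpt).filter (fun x => !(x == pvOpt log)) := by
      rw [List.filter_map]
      rfl
    rw [← hsets]
    show [(o, mine)] ++ _ = _
    rw [List.singleton_append]
    congr 1
    refine List.map_congr_left fun oo hoo => ?_
    obtain ⟨x, hx, rfl⟩ := List.mem_map.mp ((PySem.Set.mem_ofList _ _).mp hoo)
    have hne : pvOpt x ≠ pvOpt log := by simpa using (List.mem_filter.mp hx).2
    simp only [Function.comp_def]
    congr 1
    rw [List.filter_filter, List.filter_cons]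
    have hhead : (pvOpt log == pvOpt x) = false := by simpa using fun h => hne h.symm
    simp only [hhead, Bool.false_eq_true, if_false]
    refine List.filter_congr fun l _ => ?_
    by_cases hl : pvOpt l = pvOpt x
    · simp [hl, hne]
    · simp [hl]

-- B's outer recursion, in spec form
theorem cutTabAltD_items (tab : List (List Int)) :
    (cutTabAltD tab).items
      = (PySem.Set.ofList (tab.map pvDev)).map (fun d => (d, byOptionB (tab.filter (fun l => pvDev l == d)))) := by
  fun_induction cutTabAltD tab with
  | case1 => rfl
  | case2 log t d mine rest ih =>
    have hrest : rest = t.filter (fun l => !(pvDev l == pvDev log)) := by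
      show (log :: t).filter (fun l => !(pvDev l == pvDev log)) = _
      simp
    rw [hrest] at ih
    have hfresh : ∀ p ∈ (cutTabAltD (t.filter (fun l => !(pvDev l == pvDev log)))).items,
        (PySem.Dict.empty.insert d (byOptionB mine)).contains p.1 = false := by
      intro p hp
      rw [ih] at hp
      obtain ⟨dd, hdd, rfl⟩ := List.mem_map.mp hp
      obtain ⟨x, hx, rfl⟩ := List.mem_map.mp ((PySem.Set.mem_ofList _ _).mp hdd)
      have hne : pvDev x ≠ pvDev log := by simpa using (List.mem_filter.mp hx).2
      simp only [PySem.Dict.contains_insert, PySem.Dict.contains_empty, Bool.or_false,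
        beq_eq_false_iff_ne, ne_eq]
      exact hne
    have hnodup : ((cutTabAltD (t.filter (fun l => !(pvDev l == pvDev log)))).items.map (·.1)).Nodup := by
      rw [ih, List.map_map]
      simp [Function.comp_def, PySem.Set.nodup_ofList]
    rw [hrest]
    show ((PySem.Dict.empty.insert d (byOptionB mine)).update
        (cutTabAltD (t.filter (fun l => !(pvDev l == pvDev log)))).items).items = _
    have hfold : (List.foldl (fun acc p => acc.insert p.1 p.2)
          (PySem.Dict.empty.insert d (byOptionB mine))
          (cutTabAltD (t.filter (fun l => !(pvDev l == pvDev log)))).items).items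
        = (PySem.Dict.empty.insert d (byOptionB mine)).items
            ++ (cutTabAltD (t.filter (fun l => !(pvDev l == pvDev log)))).items.map (fun p => (p.1, p.2)) :=
      PySem.Dict.items_foldl_insert_fresh
        ((cutTabAltD (t.filter (fun l => !(pvDev l == pvDev log)))).items)
        (fun (p : Int × PySem.Dict Int (List (List Int))) => p.1) (fun p => p.2)
        (PySem.Dict.empty.insert d (byOptionB mine)) hfresh hnodup
    rw [show ((PySem.Dict.empty.insert d (byOptionB mine)).update
          (cutTabAltD (t.filter (fun l => !(pvDev l == pvDev log)))).items).items
        = _ from hfold, ih]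
    simp only [List.map_map, List.map_cons]
    rw [set_ofList_cons, List.map_cons]
    have hsets : (t.filter (fun l => !(pvDev l == pvDev log))).map pvDev
        = (t.map pvDev).filter (fun x => !(x == pvDev log)) := by
      rw [List.filter_map]
      rfl
    rw [← hsets]
    show [(d, byOptionB mine)] ++ _ = _
    rw [List.singleton_append]
    congr 1
    refine List.map_congr_left fun dd hdd => ?_
    obtain ⟨x, hx, rfl⟩ := List.mem_map.mp ((PySem.Set.mem_ofList _ _).mp hdd)
    have hne : pvDev x ≠ pvDev log := by simpa using (List.mem_filter.mp hx).2
    simp only [Function.comp_def]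
    congr 1
    congr 1
    rw [List.filter_filter, List.filter_cons]
    have hhead : (pvDev log == pvDev x) = false := by simpa using fun h => hne h.symm
    simp only [hhead, Bool.false_eq_true, if_false]
    refine List.filter_congr fun l _ => ?_
    by_cases hl : pvDev l = pvDev x
    · simp [hl, hne]
    · simp [hl]

-- A's outer fold, in spec form
theorem loop1_items (tab : List (List Int)) :
    (cutTabLoop1 tab).items
      = (PySem.Set.ofList (tab.map pvDev)).map
          (fun d => (d, (tab.filter (fun l => pvDev l == d)).foldl innerStep PySem.Dict.empty)) := by
  rw [loop1_eq_fold]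
  have hnd : (tab.foldl outerStep PySem.Dict.empty).keys.Nodup :=
    PySem.Dict.nodup_keys_foldl_modify_key tab pvDev PySem.Dict.empty (fun _ x inn => innerStep inn x)
      PySem.Dict.empty (by simp)
  have hkeys : (tab.foldl outerStep PySem.Dict.empty).keys = PySem.Set.ofList (tab.map pvDev) :=
    PySem.Dict.keys_foldl_modify_key tab pvDev PySem.Dict.empty (fun _ x inn => innerStep inn x)
      PySem.Dict.empty
  rw [PySem.Dict.items_eq_map_keys _ hnd PySem.Dict.empty, hkeys]
  refine List.map_congr_left fun d _ => ?_
  rw [foldl_outer_getD]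
  simp

-- invariant needed for the copy loop: Nodup outer keys, Nodup keys of every inner dict
def Loop1Inv (d : PySem.Dict Int (PySem.Dict Int (List (List Int)))) : Prop :=
  d.keys.Nodup ∧ ∀ p ∈ d.items, p.2.keys.Nodup

theorem loop1_inv (tab : List (List Int)) : Loop1Inv (cutTabLoop1 tab) := by
  constructor
  · rw [loop1_eq_fold]
    exact PySem.Dict.nodup_keys_foldl_modify_key tab pvDev PySem.Dict.empty
      (fun _ x inn => innerStep inn x) PySem.Dict.empty (by simp)
  · intro p hp
    rw [loop1_items] at hp
    obtain ⟨d, _, rfl⟩ := List.mem_map.mp hp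
    exact PySem.Dict.nodup_keys_foldl_modify_key _ pvOpt [] (fun _ x v => v ++ [x])
      PySem.Dict.empty (by simp)

-- A's second loop is an identity copy: on any dict satisfying the invariant it rebuilds the same dict.
theorem copy_loop_id (ct : PySem.Dict Int (PySem.Dict Int (List (List Int)))) (h : Loop1Inv ct) :
    ct.items.foldl (fun cd p =>
      cd.insert p.1 (p.2.items.foldl (fun inn q =>
        inn.insert q.1 (q.2.foldl (fun acc log => acc ++ [log]) []))
        PySem.Dict.empty))
    PySem.Dict.empty = ct := by
  have hcopyInner : ∀ p ∈ ct.items,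
      p.2.items.foldl (fun inn q =>
        inn.insert q.1 (q.2.foldl (fun acc log => acc ++ [log]) [])) PySem.Dict.empty = p.2 := by
    intro p hp
    apply PySem.Dict.ext
    rw [PySem.Dict.items_foldl_insert_fresh p.2.items (·.1)
        (fun q => q.2.foldl (fun acc log => acc ++ [log]) []) PySem.Dict.empty
        (fun a _ => PySem.Dict.contains_empty (ν := List (List Int)) a)
        (h.2 p hp)]
    simp only [PySem.List.foldl_append_singleton, List.nil_append]
    simp [PySem.Dict.empty]
  apply PySem.Dict.ext
  rw [PySem.Dict.items_foldl_insert_fresh ct.items (·.1)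
      (fun p => p.2.items.foldl (fun inn q =>
        inn.insert q.1 (q.2.foldl (fun acc log => acc ++ [log]) [])) PySem.Dict.empty)
      PySem.Dict.empty
      (fun a _ => PySem.Dict.contains_empty (ν := PySem.Dict Int (List (List Int))) a) h.1]
  have hmap : List.map (fun p => (p.1, p.2.items.foldl (fun inn q =>
        inn.insert q.1 (q.2.foldl (fun acc log => acc ++ [log]) [])) PySem.Dict.empty)) ct.items
      = List.map id ct.items :=
    List.map_congr_left (fun p hp => by rw [hcopyInner p hp]; rfl)
  rw [hmap, List.map_id]
  simp [PySem.Dict.empty]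

-- ===== VERDICT (by name: the statement is the Claim_ definition above) =====
theorem cut_tab_spec : Claim_equal_cut_tab := by
  intro tab _ _
  unfold Spec_cut_tab cut_tab cut_tab_alt
  dsimp only
  rw [copy_loop_id (cutTabLoop1 tab) (loop1_inv tab), loop1_items, cutTabAltD_items,
    List.map_map, List.map_map]
  refine List.map_congr_left (fun d _ => ?_)
  simp only [Function.comp]
  rw [inner_fold_items, byOptionB_items]
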